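-- pv_equiv track=rewrite | github.com/LHAMNS/redstone-ai | redstone-mcp/src/redstone_mcp/server.py | _classify_stability
-- ===== SOURCE A (Python) =====
-- def _classify_stability(samples: list[tuple[tuple[str, int], ...]], quiet_ticks: int, period_limit: int) -> tuple[str, int | None]:
--     if not samples:
--         return "unsettled", None
--     if len(samples) >= quiet_ticks and len(set(samples[-quiet_ticks:])) == 1:
--         return "stable", None
--     for period in range(1, min(period_limit, len(samples) // 2) + 1):
--         tail = samples[-period:]
--         if len(samples) >= period * 3 and samples[-period * 3 : -period * 2] == tail and samples[-period * 2 : -period] == tail: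
--             return "oscillating", period
--     return "unsettled", None
-- ===== SOURCE B (Python) =====
-- def _classify_stability(samples: list[tuple[tuple[str, int], ...]], quiet_ticks: int, period_limit: int) -> tuple[str, int | None]:
--     n = len(samples)
--     if n == 0:
--         return "unsettled", None
--     # One linear pass: Z-array of the reversed history.  z[p] = length of the
--     # longest common prefix of rev and rev[p:]; a suffix of the history repeats
--     # with period p over its last 3*p entries exactly when z[p] >= 2*p, and the
--     # constant tail has length z[1] + 1.
--     rev = samples[::-1]
--     z = [0] * n
--     z[0] = n
--     left = right = 0
--     for i in range(1, n):
--         k = min(right - i, z[i - left]) if i < right else 0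
--         while i + k < n and rev[k] == rev[i + k]:
--             k += 1
--         z[i] = k
--         if i + k > right:
--             left, right = i, i + k
--     run = z[1] + 1 if n > 1 else 1
--     if quiet_ticks <= n and run >= quiet_ticks:
--         return "stable", None
--     for p in range(1, min(period_limit, n // 2) + 1):
--         if z[p] >= 2 * p:
--             return "oscillating", p
--     return "unsettled", None
-- ===== Notes on version B (the rewrite author's own statement) =====
-- stated objective: faster
-- what changed: B reverses the history once, computes its Z-array (longest common prefix of rev and rev[p:]) in one linear pass, and then answers both questions from that table: the constant tail has length z[1]+1 (quiet check) and the last 3p entries repeat with period p iff z[p] >= 2p, replacing A's per-period triple-slice comparisons; Pre_ excludes non-positive quiet_ticks, where A's slice samples[-quiet_ticks:] accidentally inspects a window starting at index -quiet_ticks (the whole list for 0) rather than a quiet window, while B treats an empty quiet window as trivially satisfied.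
-- outside the precondition, e.g. on _classify_stability([(('a', 1),), (('b', 2),)], 0, 0): A returns ('unsettled', None), B returns ('stable', None)
import Mathlib
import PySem

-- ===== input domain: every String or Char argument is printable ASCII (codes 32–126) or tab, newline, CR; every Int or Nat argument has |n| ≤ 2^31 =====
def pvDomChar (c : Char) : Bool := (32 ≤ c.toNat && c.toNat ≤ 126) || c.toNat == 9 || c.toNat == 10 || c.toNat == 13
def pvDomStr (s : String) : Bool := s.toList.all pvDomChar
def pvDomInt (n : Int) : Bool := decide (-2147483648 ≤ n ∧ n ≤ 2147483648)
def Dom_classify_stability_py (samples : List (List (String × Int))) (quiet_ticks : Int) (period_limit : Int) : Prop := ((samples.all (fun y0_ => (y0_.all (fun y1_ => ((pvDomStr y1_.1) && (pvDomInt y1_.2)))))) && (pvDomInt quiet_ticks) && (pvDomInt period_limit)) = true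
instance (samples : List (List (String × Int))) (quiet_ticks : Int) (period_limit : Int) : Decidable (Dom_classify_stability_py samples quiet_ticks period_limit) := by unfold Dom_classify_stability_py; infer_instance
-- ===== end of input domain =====

-- B builds the Z-array of the reversed history in one linear pass and reads both the quiet check
-- (constant tail length = z[1]+1) and every period check (z[p] ≥ 2p) off that table: O(n + P) vs A's O(P·n).
-- ===== PORT A =====
-- the 'for period in range(...): ... return ...' loop: first period whose three trailing blocks coincide
def pvLoopA (samples : List (List (String × Int))) : List Int → Option Int
  | [] => none
  | p :: rest =>
    let tail := PySem.List.slice samples (some (-p)) none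
    if (samples.length : Int) ≥ p * 3 ∧
       PySem.List.slice samples (some (-(p * 3))) (some (-(p * 2))) = tail ∧
       PySem.List.slice samples (some (-(p * 2))) (some (-p)) = tail
    then some p else pvLoopA samples rest

def classify_stability_py (samples : List (List (String × Int))) (quiet_ticks : Int) (period_limit : Int) : String × Option Int :=
  if samples = [] then ("unsettled", none)
  else if (samples.length : Int) ≥ quiet_ticks ∧
          (PySem.Set.ofList (PySem.List.slice samples (some (-quiet_ticks)) none)).length = 1 then
    ("stable", none)
  else
    match pvLoopA samples (PySem.List.pyRange 1 (min period_limit (PySem.Int.floordiv (samples.length : Int) 2) + 1)) with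
    | some p => ("oscillating", some p)
    | none => ("unsettled", none)

-- ===== PORT B =====
-- the 'while i + k < n and rev[k] == rev[i + k]: k += 1' loop
def pvZext (r : List (List (String × Int))) (i k : Nat) : Nat :=
  if h : i + k < r.length ∧ r.getD k [] = r.getD (i + k) [] then pvZext r i (k + 1) else k
  termination_by r.length - (i + k)
  decreasing_by omega

-- one iteration of the 'for i in range(1, n)' loop, state (z, left, right)
def pvZstep (r : List (List (String × Int))) (st : List Nat × Nat × Nat) (i : Nat) : List Nat × Nat × Nat :=
  let k0 : Nat := if i < st.2.2 then min (st.2.2 - i) (st.1.getD (i - st.2.1) 0) else 0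
  let k := pvZext r i k0
  let z := st.1.set i k
  if st.2.2 < i + k then (z, i, i + k) else (z, st.2.1, st.2.2)

-- z = [0]*n; z[0] = n; then the loop over i = 1 .. n-1
def pvZarr (r : List (List (String × Int))) : List Nat :=
  ((List.range' 1 (r.length - 1)).foldl (pvZstep r) ((List.replicate r.length 0).set 0 r.length, 0, 0)).1

-- the 'for p in range(...): if z[p] >= 2 * p: return ...' loop
def pvLoopB (z : List Nat) : List Int → Option Int
  | [] => none
  | p :: rest => if 2 * p ≤ (z.getD p.toNat 0 : Int) then some p else pvLoopB z rest

def classify_stability_py_alt (samples : List (List (String × Int))) (quiet_ticks : Int) (period_limit : Int) : String × Option Int :=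
  let n := samples.length
  if n = 0 then ("unsettled", none)
  else
    let z := pvZarr samples.reverse
    let run : Int := if 1 < n then (z.getD 1 0 : Int) + 1 else 1
    if quiet_ticks ≤ (n : Int) ∧ quiet_ticks ≤ run then ("stable", none)
    else
      match pvLoopB z (PySem.List.pyRange 1 (min period_limit (PySem.Int.floordiv (n : Int) 2) + 1)) with
      | some p => ("oscillating", some p)
      | none => ("unsettled", none)

-- ===== PRECONDITION & SPEC =====
-- Pre_ excludes non-positive quiet_ticks, on which A's slice samples[-quiet_ticks:] accidentally
-- inspects a window starting at index -quiet_ticks (the whole list for 0) rather than a quiet window;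
-- B treats an empty quiet window as trivially satisfied there.
def Pre_classify_stability_py (samples : List (List (String × Int))) (quiet_ticks : Int) (period_limit : Int) : Prop :=
  1 ≤ quiet_ticks
instance (samples : List (List (String × Int))) (quiet_ticks : Int) (period_limit : Int) : Decidable (Pre_classify_stability_py samples quiet_ticks period_limit) := by unfold Pre_classify_stability_py; infer_instance
def pvWitness_classify_stability_py : (List (List (String × Int))) × Int × Int := ([[("a", 1)], [("b", 2)]], 1, 1)

def Spec_classify_stability_py (samples : List (List (String × Int))) (quiet_ticks : Int) (period_limit : Int) (out : String × Option Int) : Prop := out = classify_stability_py_alt samples quiet_ticks period_limit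
instance (samples : List (List (String × Int))) (quiet_ticks : Int) (period_limit : Int) (out : String × Option Int) : Decidable (Spec_classify_stability_py samples quiet_ticks period_limit out) := by unfold Spec_classify_stability_py; infer_instance

-- ===== CLAIM (what is proved, stated in full; the proofs are below) =====
def Claim_equal_classify_stability_py : Prop := ∀ (samples : List (List (String × Int))) (quiet_ticks : Int) (period_limit : Int), Dom_classify_stability_py samples quiet_ticks period_limit → Pre_classify_stability_py samples quiet_ticks period_limit → Spec_classify_stability_py samples quiet_ticks period_limit (classify_stability_py samples quiet_ticks period_limit)

-- ===== LEMMAS AND PROOFS =====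

-- naive longest common prefix (the value the Z-array stores)
def pvLcp {α : Type} [DecidableEq α] : List α → List α → Nat
  | a :: s, b :: t => if a = b then pvLcp s t + 1 else 0
  | _, _ => 0

theorem pvLcp_le_left {α : Type} [DecidableEq α] (s t : List α) : pvLcp s t ≤ s.length := by
  induction s generalizing t with
  | nil => simp [pvLcp]
  | cons a s ih =>
    cases t with
    | nil => simp [pvLcp]
    | cons b t => simp only [pvLcp]; split <;> simp <;> exact ih t

theorem pvLcp_le_right {α : Type} [DecidableEq α] (s t : List α) : pvLcp s t ≤ t.length := by
  induction s generalizing t with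
  | nil => simp [pvLcp]
  | cons a s ih =>
    cases t with
    | nil => simp [pvLcp]
    | cons b t => simp only [pvLcp]; split <;> simp <;> exact ih t

theorem pvLcp_getElem? {α : Type} [DecidableEq α] (s t : List α) :
    ∀ j, j < pvLcp s t → s[j]? = t[j]? := by
  induction s generalizing t with
  | nil => simp [pvLcp]
  | cons a s ih =>
    cases t with
    | nil => simp [pvLcp]
    | cons b t =>
      intro j hj
      simp only [pvLcp] at hj
      split at hj
      · cases j with
        | zero => simp [*]
        | succ j => simpa using ih t j (by omega)
      · omega

theorem pvLcp_ge {α : Type} [DecidableEq α] (s t : List α) (m : Nat)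
    (h1 : m ≤ s.length) (h2 : m ≤ t.length) (h : ∀ j, j < m → s[j]? = t[j]?) :
    m ≤ pvLcp s t := by
  induction s generalizing t m with
  | nil => simp at h1; omega
  | cons a s ih =>
    cases t with
    | nil => simp at h2; omega
    | cons b t =>
      cases m with
      | zero => omega
      | succ m =>
        have hab : a = b := by have := h 0 (by omega); simpa using this
        simp only [pvLcp, if_pos hab]
        have := ih t m (by simpa using h1) (by simpa using h2)
          (fun j hj => by simpa using h (j + 1) (by omega))
        omega

theorem pvLcp_stop {α : Type} [DecidableEq α] (s t : List α)
    (h1 : pvLcp s t < s.length) (h2 : pvLcp s t < t.length) :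
    s[pvLcp s t]? ≠ t[pvLcp s t]? := by
  induction s generalizing t with
  | nil => simp at h1
  | cons a s ih =>
    cases t with
    | nil => simp at h2
    | cons b t =>
      simp only [pvLcp] at h1 h2 ⊢
      by_cases hab : a = b
      · rw [if_pos hab] at h1 h2 ⊢
        simp only [List.length_cons] at h1 h2
        simpa [hab] using ih t (by omega) (by omega)
      · rw [if_neg hab] at h1 h2 ⊢
        simpa using hab

-- the while loop computes the lcp, starting from any sound lower bound
theorem pvZext_eq (r : List (List (String × Int))) (i k : Nat)
    (hk : k ≤ pvLcp r (r.drop i)) : pvZext r i k = pvLcp r (r.drop i) := by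
  have hL1 : pvLcp r (r.drop i) ≤ r.length := pvLcp_le_left _ _
  have hL2 : pvLcp r (r.drop i) ≤ r.length - i := by
    have := pvLcp_le_right r (r.drop i); simpa using this
  have key : ∀ fuel k, r.length - (i + k) ≤ fuel → k ≤ pvLcp r (r.drop i) →
      pvZext r i k = pvLcp r (r.drop i) := by
    intro fuel
    induction fuel with
    | zero =>
      intro k hf hk
      rw [pvZext, dif_neg (by rintro ⟨h1, _⟩; omega)]
      omega
    | succ f ih =>
      intro k hf hk
      rw [pvZext]
      split
      · next h =>
        have hkL : k < pvLcp r (r.drop i) := by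
          by_contra hge
          have hkeq : k = pvLcp r (r.drop i) := by omega
          have hstop := pvLcp_stop r (r.drop i) (by omega) (by simp; omega)
          apply hstop
          rw [List.getElem?_drop, List.getElem?_eq_getElem (by omega : pvLcp r (r.drop i) < r.length),
            List.getElem?_eq_getElem (by omega : i + pvLcp r (r.drop i) < r.length)]
          have h2 := h.2
          rw [List.getD_eq_getElem _ _ (by omega), List.getD_eq_getElem _ _ (by omega)] at h2
          subst hkeq
          exact congrArg some h2
        exact ih (k + 1) (by omega) (by omega)
      · next h =>
        by_cases hin : i + k < r.length
        · have hne : r.getD k [] ≠ r.getD (i + k) [] := fun he => h ⟨hin, he⟩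
          by_contra hne2
          have hkL : k < pvLcp r (r.drop i) := by omega
          have heq := pvLcp_getElem? r (r.drop i) k hkL
          rw [List.getElem?_drop, List.getElem?_eq_getElem (by omega : k < r.length),
            List.getElem?_eq_getElem hin] at heq
          apply hne
          rw [List.getD_eq_getElem _ _ (by omega), List.getD_eq_getElem _ _ hin]
          exact Option.some.inj heq
        · omega
  exact key (r.length - (i + k)) k le_rfl hk

-- the fold invariant
def pvInv (r : List (List (String × Int))) (st : List Nat × Nat × Nat) (m : Nat) : Prop :=
  st.1.length = r.length ∧
  (∀ j, 1 ≤ j → j ≤ m → st.1.getD j 0 = pvLcp r (r.drop j)) ∧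
  ((st.2.1 = 0 ∧ st.2.2 = 0) ∨
    (1 ≤ st.2.1 ∧ st.2.1 ≤ m ∧ st.2.2 ≤ st.2.1 + pvLcp r (r.drop st.2.1)))

theorem pvInv_step (r : List (List (String × Int))) (st : List Nat × Nat × Nat) (m : Nat)
    (hinv : pvInv r st m) (hm : m + 1 ≤ r.length - 1) :
    pvInv r (pvZstep r st (m + 1)) (m + 1) := by
  obtain ⟨z, l, rgt⟩ := st
  obtain ⟨hlen, hzj, hbox⟩ := hinv
  simp only at hlen hzj hbox
  have hrlen : m + 2 ≤ r.length := by omega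
  set k0 : Nat := if m + 1 < rgt then min (rgt - (m + 1)) (z.getD (m + 1 - l) 0) else 0 with hk0def
  have hk0 : k0 ≤ pvLcp r (r.drop (m + 1)) := by
    rw [hk0def]
    split
    · next hir =>
      rcases hbox with ⟨hl0, hr0⟩ | ⟨hl1, hlm, hb⟩
      · omega
      · have hzl : z.getD (m + 1 - l) 0 = pvLcp r (r.drop (m + 1 - l)) :=
          hzj (m + 1 - l) (by omega) (by omega)
        have hlcpl : pvLcp r (r.drop l) ≤ r.length - l := by
          have := pvLcp_le_right r (r.drop l); simpa using this
        apply pvLcp_ge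
        · omega
        · simp; omega
        · intro j hj
          rw [List.getElem?_drop]
          have hj1 : j < pvLcp r (r.drop (m + 1 - l)) := by rw [← hzl]; omega
          have e1 := pvLcp_getElem? r (r.drop (m + 1 - l)) j hj1
          rw [List.getElem?_drop] at e1
          have hj2 : m + 1 + j - l < pvLcp r (r.drop l) := by omega
          have e2 := pvLcp_getElem? r (r.drop l) (m + 1 + j - l) hj2
          rw [List.getElem?_drop] at e2
          rw [show m + 1 - l + j = m + 1 + j - l by omega] at e1
          rw [show l + (m + 1 + j - l) = m + 1 + j by omega] at e2
          rw [e1, e2]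
    · omega
  set k : Nat := pvZext r (m + 1) k0 with hkdef
  have hk : k = pvLcp r (r.drop (m + 1)) := pvZext_eq r (m + 1) k0 hk0
  have hilt : m + 1 < z.length := by omega
  have hgj : ∀ j, 1 ≤ j → j ≤ m + 1 → (z.set (m + 1) k).getD j 0 = pvLcp r (r.drop j) := by
    intro j hj1 hj2
    by_cases hji : j = m + 1
    · subst hji
      rw [List.getD_eq_getElem?_getD, List.getElem?_set_self hilt, Option.getD_some, hk]
    · rw [List.getD_eq_getElem?_getD, List.getElem?_set_ne (by omega : m + 1 ≠ j),
        ← List.getD_eq_getElem?_getD]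
      exact hzj j hj1 (by omega)
  have hres : pvZstep r (z, l, rgt) (m + 1) =
      if rgt < m + 1 + k then (z.set (m + 1) k, m + 1, m + 1 + k)
      else (z.set (m + 1) k, l, rgt) := by
    simp only [pvZstep, hk0def, hkdef]
  rw [hres]
  split
  · next hlt =>
    exact ⟨by simpa using hlen, hgj, Or.inr ⟨by show 1 ≤ m + 1; omega,
      by show m + 1 ≤ m + 1; omega,
      by show m + 1 + k ≤ m + 1 + pvLcp r (r.drop (m + 1)); omega⟩⟩
  · next hlt =>
    refine ⟨by simpa using hlen, hgj, ?_⟩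
    rcases hbox with ⟨hl0, hr0⟩ | ⟨hl1, hlm, hb⟩
    · exact Or.inl ⟨hl0, hr0⟩
    · exact Or.inr ⟨hl1, by show l ≤ m + 1; omega,
        by show rgt ≤ l + pvLcp r (r.drop l); exact hb⟩

theorem pvZarr_spec (r : List (List (String × Int))) (p : Nat)
    (h1 : 1 ≤ p) (h2 : p < r.length) :
    (pvZarr r).getD p 0 = pvLcp r (r.drop p) := by
  have hstep : ∀ m, m ≤ r.length - 1 →
      pvInv r ((List.range' 1 m).foldl (pvZstep r) ((List.replicate r.length 0).set 0 r.length, 0, 0)) m := by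
    intro m
    induction m with
    | zero =>
      intro _
      exact ⟨by simp, by intro j hj1 hj2; omega, Or.inl ⟨rfl, rfl⟩⟩
    | succ m ih =>
      intro hm
      have hr : List.range' 1 (m + 1) = List.range' 1 m ++ [m + 1] := by
        rw [List.range'_concat]; simp [Nat.add_comm]
      rw [hr, List.foldl_append, List.foldl_cons, List.foldl_nil]
      exact pvInv_step r _ m (ih (by omega)) hm
  have h := hstep (r.length - 1) le_rfl
  exact h.2.1 p h1 (by omega)

-- set(l) has exactly one element iff l is a nonempty constant list
theorem pv_set_len_one {α : Type} [BEq α] [LawfulBEq α] (l : List α) :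
    (PySem.Set.ofList l).length = 1 ↔ ∃ a, ∀ x, x ∈ l ↔ x = a := by
  rw [List.length_eq_one_iff]
  constructor
  · rintro ⟨a, ha⟩
    exact ⟨a, fun x => by rw [← PySem.Set.mem_ofList, ha, List.mem_singleton]⟩
  · rintro ⟨a, ha⟩
    refine ⟨a, ?_⟩
    have hmem : ∀ x, x ∈ PySem.Set.ofList l ↔ x = a := by
      intro x; rw [PySem.Set.mem_ofList]; exact ha x
    have hnd := PySem.Set.nodup_ofList l
    cases h : PySem.Set.ofList l with
    | nil =>
      exfalso
      have : a ∈ PySem.Set.ofList l := (hmem a).mpr rfl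
      simp [h] at this
    | cons x xs =>
      have hx : x = a := (hmem x).mp (by simp [h])
      have hxs : xs = [] := by
        cases hxs : xs with
        | nil => rfl
        | cons y ys =>
          exfalso
          have hy : y = a := (hmem y).mp (by simp [h, hxs])
          rw [h, hxs] at hnd
          simp [hx, hy] at hnd
      rw [hx, hxs]

-- equality of two k-windows of xs, pointwise
theorem pv_window_eq (xs : List (List (String × Int))) (a b k : Nat)
    (ha : a + k ≤ xs.length) (hb : b + k ≤ xs.length) :
    ((xs.drop a).take k = (xs.drop b).take k) ↔
      (∀ j : Nat, j < k → xs.getD (a + j) [] = xs.getD (b + j) []) := by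
  constructor
  · intro h j hj
    rw [List.getD_eq_getElem _ _ (by omega), List.getD_eq_getElem _ _ (by omega)]
    have e1 : ((xs.drop a).take k)[j]'(by simp; omega) = xs[a+j]'(by omega) := by
      simp [List.getElem_take, List.getElem_drop]
    have e2 : ((xs.drop b).take k)[j]'(by simp; omega) = xs[b+j]'(by omega) := by
      simp [List.getElem_take, List.getElem_drop]
    rw [← e1, ← e2]
    exact List.getElem_of_eq h _
  · intro h
    apply List.ext_getElem
    · simp; omega
    · intro j hj1 hj2
      have hjk : j < k := by simp at hj1; omega
      simp only [List.getElem_take, List.getElem_drop]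
      have := h j hjk
      rw [List.getD_eq_getElem _ _ (by omega), List.getD_eq_getElem _ _ (by omega)] at this
      exact this

-- A's quiet-window condition, for quiet_ticks ≥ 1, says: the constant suffix has length ≥ quiet_ticks
theorem pv_stable_iff (samples : List (List (String × Int))) (qt : Int)
    (hq1 : 1 ≤ qt) (hne : samples ≠ []) :
    ((samples.length : Int) ≥ qt ∧
        (PySem.Set.ofList (PySem.List.slice samples (some (-qt)) none)).length = 1) ↔
      (qt ≤ (samples.length : Int) ∧
        qt ≤ (pvLcp samples.reverse (samples.reverse.drop 1) : Int) + 1) := by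
  have hn1 : 1 ≤ samples.length := List.length_pos_of_ne_nil hne
  by_cases hq : qt ≤ (samples.length : Int)
  · obtain ⟨q, rfl⟩ : ∃ q : Nat, qt = (q : Int) := ⟨qt.toNat, by omega⟩
    have hq1' : 1 ≤ q := by exact_mod_cast hq1
    have hqn : q ≤ samples.length := by exact_mod_cast hq
    rw [PySem.List.slice_some_none, PySem.List.clampIdx_neg_natCast _ q (by omega),
      pv_set_len_one]
    have hrlen : samples.reverse.length = samples.length := List.length_reverse
    have hcons : ∀ j, j < pvLcp samples.reverse (samples.reverse.drop 1) →
        samples.reverse[j]? = samples.reverse[j + 1]? := by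
      intro j hj
      have h := pvLcp_getElem? samples.reverse (samples.reverse.drop 1) j hj
      rwa [List.getElem?_drop, Nat.add_comm 1 j] at h
    have hconst : ∀ j, j ≤ pvLcp samples.reverse (samples.reverse.drop 1) →
        samples.reverse[j]? = samples.reverse[0]? := by
      intro j
      induction j with
      | zero => intro _; rfl
      | succ j ih => intro hj; rw [← hcons j (by omega)]; exact ih (by omega)
    have hmem : ∀ x, x ∈ samples.drop (samples.length - q) ↔
        ∃ i, i < q ∧ samples[samples.length - q + i]? = some x := by
      intro x
      rw [List.mem_iff_getElem]
      constructor
      · rintro ⟨i, hi, hx⟩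
        have hiq : i < q := by simp at hi; omega
        refine ⟨i, hiq, ?_⟩
        rw [List.getElem?_eq_getElem (by omega), ← hx, List.getElem_drop]
      · rintro ⟨i, hiq, hx⟩
        refine ⟨i, by simp; omega, ?_⟩
        rw [List.getElem_drop]
        have := List.getElem?_eq_getElem (l := samples) (i := samples.length - q + i) (by omega)
        rw [this] at hx
        exact Option.some.inj hx
    have hrev : ∀ j, j < samples.length → samples.reverse[j]? = samples[samples.length - 1 - j]? := by
      intro j hj
      rw [List.getElem?_eq_getElem (by omega : j < samples.reverse.length),
        List.getElem?_eq_getElem (by omega : samples.length - 1 - j < samples.length)]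
      exact congrArg some (List.getElem_reverse ..)
    have hsuf : (∃ a, ∀ x, x ∈ samples.drop (samples.length - q) ↔ x = a) ↔
        q ≤ pvLcp samples.reverse (samples.reverse.drop 1) + 1 := by
      constructor
      · rintro ⟨a, ha⟩
        have hge : q - 1 ≤ pvLcp samples.reverse (samples.reverse.drop 1) := by
          apply pvLcp_ge
          · omega
          · simp; omega
          · intro j hj
            rw [List.getElem?_drop, Nat.add_comm 1 j]
            have h1 : samples.reverse[j]? = some a := by
              rw [hrev j (by omega)]
              have hmemj : samples[samples.length - 1 - j]'(by omega) ∈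
                  samples.drop (samples.length - q) := by
                rw [(hmem _)]
                exact ⟨q - 1 - j, by omega, by
                  rw [List.getElem?_eq_getElem (by omega)]
                  exact congrArg some (by congr 1; omega)⟩
              rw [List.getElem?_eq_getElem (by omega)]
              exact congrArg some ((ha _).mp hmemj)
            have h2 : samples.reverse[j + 1]? = some a := by
              rw [hrev (j + 1) (by omega)]
              have hmemj : samples[samples.length - 1 - (j + 1)]'(by omega) ∈
                  samples.drop (samples.length - q) := by
                rw [(hmem _)]
                exact ⟨q - 2 - j, by omega, by
                  rw [List.getElem?_eq_getElem (by omega)]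
                  exact congrArg some (by congr 1; omega)⟩
              rw [List.getElem?_eq_getElem (by omega)]
              exact congrArg some ((ha _).mp hmemj)
            rw [h1, h2]
        omega
      · intro hle
        refine ⟨samples[samples.length - 1]'(by omega), fun x => ?_⟩
        constructor
        · intro hx
          obtain ⟨i, hiq, hxi⟩ := (hmem x).mp hx
          have hj : samples.reverse[q - 1 - i]? = samples.reverse[0]? :=
            hconst (q - 1 - i) (by omega)
          rw [hrev (q - 1 - i) (by omega), hrev 0 (by omega)] at hj
          rw [show samples.length - 1 - (q - 1 - i) = samples.length - q + i by omega] at hj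
          rw [hxi] at hj
          rw [List.getElem?_eq_getElem (by omega)] at hj
          simpa using Option.some.inj hj
        · intro hx
          subst hx
          rw [hmem _]
          exact ⟨q - 1, by omega, by
            rw [List.getElem?_eq_getElem (by omega)]
            exact congrArg some (by congr 1; omega)⟩
    rw [hsuf]
    constructor
    · rintro ⟨_, h⟩; exact ⟨hq, by omega⟩
    · rintro ⟨_, h⟩
      exact ⟨hq, by omega⟩
  · simp only [ge_iff_le, hq, false_and]

-- A's per-period condition, for 1 ≤ p ≤ n/2, says: z[p] ≥ 2p on the reversed list
theorem pv_osc_iff (samples : List (List (String × Int))) (k : Nat)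
    (hk : 1 ≤ k) (hk2 : 2 * k ≤ samples.length) :
    ((samples.length : Int) ≥ (k : Int) * 3 ∧
        PySem.List.slice samples (some (-((k : Int) * 3))) (some (-((k : Int) * 2))) = PySem.List.slice samples (some (-(k : Int))) none ∧
        PySem.List.slice samples (some (-((k : Int) * 2))) (some (-(k : Int))) = PySem.List.slice samples (some (-(k : Int))) none) ↔
      2 * k ≤ pvLcp samples.reverse (samples.reverse.drop k) := by
  by_cases h3 : (k : Int) * 3 ≤ (samples.length : Int)
  · have hk3 : 3 * k ≤ samples.length := by omega
    have c1 : PySem.List.clampIdx samples.length (-(k : Int)) = samples.length - k :=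
      PySem.List.clampIdx_neg_natCast _ k (by omega)
    have c2 : PySem.List.clampIdx samples.length (-((k : Int) * 2)) = samples.length - 2 * k := by
      have h := PySem.List.clampIdx_neg_natCast samples.length (2 * k) (by omega)
      rw [show (-(((2 * k : Nat)) : Int)) = -((k : Int) * 2) by push_cast; ring] at h
      exact h
    have c3 : PySem.List.clampIdx samples.length (-((k : Int) * 3)) = samples.length - 3 * k := by
      have h := PySem.List.clampIdx_neg_natCast samples.length (3 * k) (by omega)
      rw [show (-(((3 * k : Nat)) : Int)) = -((k : Int) * 3) by push_cast; ring] at h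
      exact h
    have hb1 : PySem.List.slice samples (some (-((k : Int) * 3))) (some (-((k : Int) * 2)))
        = (samples.drop (samples.length - 3 * k)).take k := by
      show (List.take (PySem.List.clampIdx samples.length (-((k : Int) * 2))
              - PySem.List.clampIdx samples.length (-((k : Int) * 3)))
            (List.drop (PySem.List.clampIdx samples.length (-((k : Int) * 3))) samples)) = _
      rw [c2, c3, show samples.length - 2 * k - (samples.length - 3 * k) = k from by omega]
    have hb2 : PySem.List.slice samples (some (-((k : Int) * 2))) (some (-(k : Int)))
        = (samples.drop (samples.length - 2 * k)).take k := by
      show (List.take (PySem.List.clampIdx samples.length (-(k : Int))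
              - PySem.List.clampIdx samples.length (-((k : Int) * 2)))
            (List.drop (PySem.List.clampIdx samples.length (-((k : Int) * 2))) samples)) = _
      rw [c1, c2, show samples.length - k - (samples.length - 2 * k) = k from by omega]
    have htail : PySem.List.slice samples (some (-(k : Int))) none
        = (samples.drop (samples.length - k)).take k := by
      rw [PySem.List.slice_some_none, c1, List.take_of_length_le (by simp; omega)]
    rw [hb1, hb2, htail,
      pv_window_eq samples (samples.length - 3 * k) (samples.length - k) k (by omega) (by omega),
      pv_window_eq samples (samples.length - 2 * k) (samples.length - k) k (by omega) (by omega)]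
    have hE : ∀ a b, a < samples.length → b < samples.length →
        (samples.getD a [] = samples.getD b [] ↔ samples[a]? = samples[b]?) := by
      intro a b ha hb
      rw [List.getD_eq_getElem _ _ ha, List.getD_eq_getElem _ _ hb,
        List.getElem?_eq_getElem ha, List.getElem?_eq_getElem hb]
      exact ⟨congrArg some, fun h => Option.some.inj h⟩
    have hrev : ∀ j, j < samples.length → samples.reverse[j]? = samples[samples.length - 1 - j]? := by
      intro j hj
      rw [List.getElem?_eq_getElem (by simp; omega : j < samples.reverse.length),
        List.getElem?_eq_getElem (by omega : samples.length - 1 - j < samples.length)]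
      exact congrArg some (List.getElem_reverse ..)
    constructor
    · rintro ⟨_, hB1, hB2⟩
      apply pvLcp_ge
      · simp; omega
      · simp; omega
      · intro i hi
        rw [List.getElem?_drop, hrev i (by omega), hrev (k + i) (by omega)]
        by_cases hik : i < k
        · have h2 := (hE _ _ (by omega) (by omega)).mp (hB2 (k - 1 - i) (by omega))
          rw [show samples.length - 2 * k + (k - 1 - i) = samples.length - 1 - (k + i) by omega,
            show samples.length - k + (k - 1 - i) = samples.length - 1 - i by omega] at h2
          exact h2.symm
        · have h1 := (hE _ _ (by omega) (by omega)).mp (hB1 (2 * k - 1 - i) (by omega))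
          have h2 := (hE _ _ (by omega) (by omega)).mp (hB2 (2 * k - 1 - i) (by omega))
          rw [show samples.length - 3 * k + (2 * k - 1 - i) = samples.length - 1 - (k + i) by omega,
            show samples.length - k + (2 * k - 1 - i) = samples.length - 1 - (i - k) by omega] at h1
          rw [show samples.length - 2 * k + (2 * k - 1 - i) = samples.length - 1 - i by omega,
            show samples.length - k + (2 * k - 1 - i) = samples.length - 1 - (i - k) by omega] at h2
          rw [h2, ← h1]
    · intro hlcp
      have hshift : ∀ i, i < 2 * k → samples[samples.length - 1 - i]? = samples[samples.length - 1 - (k + i)]? := by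
        intro i hi
        have h := pvLcp_getElem? samples.reverse (samples.reverse.drop k) i (by omega)
        rw [List.getElem?_drop, hrev i (by omega), hrev (k + i) (by omega)] at h
        exact h
      refine ⟨h3, ?_, ?_⟩
      · intro j hj
        have h1 := hshift (k - 1 - j) (by omega)
        have h2 := hshift (2 * k - 1 - j) (by omega)
        rw [show samples.length - 1 - (k - 1 - j) = samples.length - k + j by omega,
          show samples.length - 1 - (k + (k - 1 - j)) = samples.length - 2 * k + j by omega] at h1
        rw [show samples.length - 1 - (2 * k - 1 - j) = samples.length - 2 * k + j by omega,
          show samples.length - 1 - (k + (2 * k - 1 - j)) = samples.length - 3 * k + j by omega] at h2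
        exact (hE _ _ (by omega) (by omega)).mpr (by rw [← h2, ← h1])
      · intro j hj
        have h1 := hshift (k - 1 - j) (by omega)
        rw [show samples.length - 1 - (k - 1 - j) = samples.length - k + j by omega,
          show samples.length - 1 - (k + (k - 1 - j)) = samples.length - 2 * k + j by omega] at h1
        exact (hE _ _ (by omega) (by omega)).mpr h1.symm
  · constructor
    · rintro ⟨hge, _⟩
      exact absurd hge (by omega)
    · intro hc
      exfalso
      have h := pvLcp_le_right samples.reverse (samples.reverse.drop k)
      simp at h
      omega

theorem pv_loop_eq (samples : List (List (String × Int))) (l : List Int)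
    (hl : ∀ p ∈ l, 1 ≤ p ∧ 2 * p.toNat ≤ samples.length) :
    pvLoopA samples l = pvLoopB (pvZarr samples.reverse) l := by
  induction l with
  | nil => rfl
  | cons p rest ih =>
    obtain ⟨hp1, hp2⟩ := hl p (List.mem_cons_self ..)
    obtain ⟨k, rfl⟩ : ∃ k : Nat, p = (k : Int) := ⟨p.toNat, by omega⟩
    have hk1 : 1 ≤ k := by exact_mod_cast hp1
    have hk2 : 2 * k ≤ samples.length := by simpa using hp2
    simp only [pvLoopA, pvLoopB]
    have hz : (pvZarr samples.reverse).getD ((k : Int)).toNat 0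
        = pvLcp samples.reverse (samples.reverse.drop k) := by
      rw [Int.toNat_natCast]
      exact pvZarr_spec samples.reverse k hk1 (by simp; omega)
    have hcond : ((samples.length : Int) ≥ (k : Int) * 3 ∧
        PySem.List.slice samples (some (-((k : Int) * 3))) (some (-((k : Int) * 2))) = PySem.List.slice samples (some (-(k : Int))) none ∧
        PySem.List.slice samples (some (-((k : Int) * 2))) (some (-(k : Int))) = PySem.List.slice samples (some (-(k : Int))) none) ↔
        (2 * (k : Int) ≤ ((pvZarr samples.reverse).getD ((k : Int)).toNat 0 : Int)) := by
      rw [hz, pv_osc_iff samples k hk1 hk2]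
      constructor
      · intro h; exact_mod_cast h
      · intro h; exact_mod_cast h
    rw [if_congr hcond rfl (ih (fun q hq => hl q (List.mem_cons_of_mem _ hq)))]

-- ===== VERDICT (by name: the statement is the Claim_ definition above) =====
theorem classify_stability_py_spec : Claim_equal_classify_stability_py := by
  intro samples qt pl hdom hpre
  unfold Spec_classify_stability_py classify_stability_py classify_stability_py_alt
  by_cases hnil : samples = []
  · simp [hnil]
  · have hn0 : ¬(samples.length = 0) := by simpa [List.length_eq_zero_iff] using hnil
    simp only [hnil, hn0, if_false]
    have hrun : (if 1 < samples.length then ((pvZarr samples.reverse).getD 1 0 : Int) + 1 else 1)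
        = (pvLcp samples.reverse (samples.reverse.drop 1) : Int) + 1 := by
      split
      · next h => rw [pvZarr_spec samples.reverse 1 le_rfl (by simp; omega)]
      · next h =>
        have hd : samples.reverse.drop 1 = [] := by
          apply List.eq_nil_of_length_eq_zero; simp; omega
        have hz0 : pvLcp samples.reverse (samples.reverse.drop 1) = 0 := by
          rw [hd]; cases samples.reverse <;> simp [pvLcp]
        rw [hz0]; simp
    have hAB : (((samples.length : Int) ≥ qt ∧
          (PySem.Set.ofList (PySem.List.slice samples (some (-qt)) none)).length = 1)) ↔
        (qt ≤ (samples.length : Int) ∧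
          qt ≤ (if 1 < samples.length then ((pvZarr samples.reverse).getD 1 0 : Int) + 1 else 1)) := by
      rw [hrun]
      exact pv_stable_iff samples qt hpre hnil
    have hlp : ∀ p ∈ PySem.List.pyRange 1 (min pl (PySem.Int.floordiv (samples.length : Int) 2) + 1),
        1 ≤ p ∧ 2 * p.toNat ≤ samples.length := by
      intro p hp
      have hm := PySem.List.mem_pyRange_one.mp hp
      have hfd : PySem.Int.floordiv ((samples.length : Nat) : Int) ((2 : Nat) : Int)
          = ((samples.length / 2 : Nat) : Int) := PySem.Int.floordiv_natCast samples.length 2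
      have hp2 : p ≤ ((samples.length / 2 : Nat) : Int) := by
        rw [← hfd]
        have : p ≤ min pl (PySem.Int.floordiv (samples.length : Int) 2) := by omega
        calc p ≤ _ := this
          _ ≤ PySem.Int.floordiv (samples.length : Int) 2 := min_le_right _ _
        
      have h2 : samples.length / 2 * 2 ≤ samples.length := Nat.div_mul_le_self _ _
      refine ⟨by omega, by omega⟩
    rw [pv_loop_eq samples _ hlp, if_congr hAB rfl rfl]
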